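-- pv_equiv track=rewrite | github.com/sueszli/vector-database-benchmark | dataset/python-mutated/commonTask.py | domain_in_scope_domain
-- ===== SOURCE A (Python) =====
-- def domain_in_scope_domain(domain: str, scope_domain: list):
--     if False:
--         while True:
--             i = 10
--     for scope in scope_domain:
--         if domain.endswith('.' + scope):
--             return True
--     return False
-- ===== SOURCE B (Python) =====
-- def domain_in_scope_domain(domain: str, scope_domain: list):
--     s = set(scope_domain)
--     for i, c in enumerate(domain):
--         if c == '.' and domain[i+1:] in s:
--             return True
--     return False
-- ===== Notes on version B (the rewrite author's own statement) =====
-- stated objective: alternative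
-- what changed: Instead of testing endswith('.'+scope) against every scope, B builds a set of the scopes once and scans domain's characters, checking each dot-preceded suffix for membership in that set.
import Mathlib
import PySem

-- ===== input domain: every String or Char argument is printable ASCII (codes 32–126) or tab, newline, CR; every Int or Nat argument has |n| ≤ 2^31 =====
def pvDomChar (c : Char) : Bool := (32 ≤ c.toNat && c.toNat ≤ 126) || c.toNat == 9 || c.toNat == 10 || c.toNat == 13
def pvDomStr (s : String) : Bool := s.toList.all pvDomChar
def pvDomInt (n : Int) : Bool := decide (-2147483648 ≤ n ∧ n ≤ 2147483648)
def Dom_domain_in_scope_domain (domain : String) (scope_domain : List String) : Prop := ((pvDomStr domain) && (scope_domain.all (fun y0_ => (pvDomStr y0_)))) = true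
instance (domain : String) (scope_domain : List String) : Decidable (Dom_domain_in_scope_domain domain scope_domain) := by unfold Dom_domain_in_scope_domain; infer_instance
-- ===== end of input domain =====

-- B replaces A's per-scope endswith scan with one pass over domain's dot-preceded suffixes
-- looked up in a set of the scopes (objective: alternative decomposition; both total).

-- ===== PORT A =====
-- A: for scope in scope_domain: if domain.endswith('.' + scope): return True;  return False
def domain_in_scope_domain (domain : String) (scope_domain : List String) : Bool :=
  match scope_domain with
  | [] => false
  | scope :: rest =>
      if PySem.Str.endswith domain ("." ++ scope) then true
      else domain_in_scope_domain domain rest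

-- ===== PORT B =====
-- B's loop over enumerate(domain): at each character c with remaining tail `rest`
-- (= domain[i+1:]), test c == '.' and membership of the tail in the scope set.
def pvAltGo (s : PySem.Set String) (cs : List Char) : Bool :=
  match cs with
  | [] => false
  | c :: rest =>
      if c = '.' ∧ PySem.Set.contains s (String.ofList rest) then true
      else pvAltGo s rest

def domain_in_scope_domain_alt (domain : String) (scope_domain : List String) : Bool :=
  pvAltGo (PySem.Set.ofList scope_domain) domain.toList

-- ===== PRECONDITION & SPEC =====
def Spec_domain_in_scope_domain (domain : String) (scope_domain : List String) (out : Bool) : Prop := out = domain_in_scope_domain_alt domain scope_domain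
instance (domain : String) (scope_domain : List String) (out : Bool) : Decidable (Spec_domain_in_scope_domain domain scope_domain out) := by unfold Spec_domain_in_scope_domain; infer_instance

-- ===== CLAIM (what is proved, stated in full; the proofs are below) =====
def Claim_equal_domain_in_scope_domain : Prop := ∀ (domain : String) (scope_domain : List String), Dom_domain_in_scope_domain domain scope_domain → Spec_domain_in_scope_domain domain scope_domain (domain_in_scope_domain domain scope_domain)

-- ===== LEMMAS AND PROOFS =====

-- B's scan finds a hit iff some dot-preceded suffix of cs is in the set.
theorem pvAltGo_eq_true_iff (s : PySem.Set String) (cs : List Char) :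
    pvAltGo s cs = true ↔ ∃ rest : List Char, ('.' :: rest) <:+ cs ∧ PySem.Set.contains s (String.ofList rest) = true := by
  induction cs with
  | nil =>
      simp [pvAltGo]
  | cons c tl ih =>
      simp only [pvAltGo]
      split_ifs with h
      · obtain ⟨hc, hm⟩ := h
        subst hc
        simp only [true_iff]
        exact ⟨tl, List.suffix_refl _, hm⟩
      · rw [ih]
        constructor
        · rintro ⟨rest, hsuf, hm⟩
          exact ⟨rest, hsuf.trans (List.suffix_cons c tl), hm⟩
        · rintro ⟨rest, hsuf, hm⟩
          rcases List.suffix_cons_iff.mp hsuf with heq | hsuf'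
          · cases heq
            exact absurd ⟨rfl, hm⟩ h
          · exact ⟨rest, hsuf', hm⟩

-- A returns true iff some scope's dot-prefixed form is a suffix of domain.
theorem pvA_eq_true_iff (domain : String) (scope_domain : List String) :
    domain_in_scope_domain domain scope_domain = true ↔
      ∃ scope ∈ scope_domain, ('.' :: scope.toList) <:+ domain.toList := by
  induction scope_domain with
  | nil => simp [domain_in_scope_domain]
  | cons scope rest ih =>
      simp only [domain_in_scope_domain]
      split_ifs with h
      · simp only [true_iff]
        refine ⟨scope, by simp, ?_⟩
        have := (PySem.Chars.endswith_iff (s := domain.toList) (p := ("." ++ scope).toList)).mp (by simpa using h)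
        simpa using this
      · rw [ih]
        constructor
        · rintro ⟨sc, hmem, hsuf⟩
          exact ⟨sc, by simp [hmem], hsuf⟩
        · rintro ⟨sc, hmem, hsuf⟩
          rcases List.mem_cons.mp hmem with rfl | hmem'
          · exfalso
            apply h
            simp only [PySem.Str.endswith_eq]
            exact (PySem.Chars.endswith_iff _ _).mpr (by simpa using hsuf)
          · exact ⟨sc, hmem', hsuf⟩

-- ===== VERDICT (by name: the statement is the Claim_ definition above) =====
theorem domain_in_scope_domain_spec : Claim_equal_domain_in_scope_domain := by
  intro domain scope_domain _
  unfold Spec_domain_in_scope_domain domain_in_scope_domain_alt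
  rw [Bool.eq_iff_iff, pvA_eq_true_iff, pvAltGo_eq_true_iff]
  constructor
  · rintro ⟨scope, hmem, hsuf⟩
    refine ⟨scope.toList, hsuf, ?_⟩
    rw [PySem.Set.contains_iff, PySem.Set.mem_ofList, String.ofList_toList]
    exact hmem
  · rintro ⟨rest, hsuf, hm⟩
    rw [PySem.Set.contains_iff, PySem.Set.mem_ofList] at hm
    exact ⟨String.ofList rest, hm, by simpa [String.toList_ofList] using hsuf⟩
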